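-- pv_equiv track=rewrite | github.com/patyid/duck-ingest-query-bot | src/loaders/ledger_parser.py | validate_structured_columns
-- ===== SOURCE A (Python) =====
-- from typing import Any, Dict, List, Optional, Tuple
--
-- STRUCTURED_COLUMNS = [
--     "cabecalho",
--     "periodo_inicio",
--     "periodo_fim",
--     "cnpj",
--     "conta_codigo",
--     "conta_nome",
--     "data_lancamento",
--     "historico",
--     "valor",
--     "total_debito",
--     "arquivo",
--     "source",
--     "pagina",
-- ]
--
-- def validate_structured_columns(selected_columns: Optional[List[str]]) -> List[str]:
--     """
--     Valida e processa a lista de colunas selecionadas para o output estruturado.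
--
--     Verifica se as colunas fornecidas são válidas comparando com a lista de colunas
--     permitidas. Remove duplicatas mantendo a ordem original e lança erro se colunas
--     inválidas forem encontradas.
--
--     Args:
--         selected_columns (Optional[List[str]]): Lista de nomes de colunas desejadas.
--
--     Returns:
--         List[str]: Lista validada e deduplicada de nomes de colunas.
--
--     Raises:
--         ValueError: Se colunas inválidas forem fornecidas ou lista vazia.
--     """
--     if selected_columns is None:
--         return STRUCTURED_COLUMNS
--
--     cleaned = [col.strip() for col in selected_columns if col and col.strip()]
--     if not cleaned:
--         raise ValueError(
--             "Nenhuma coluna valida foi informada em --structured-columns."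
--         )
--
--     invalid = [col for col in cleaned if col not in STRUCTURED_COLUMNS]
--     if invalid:
--         raise ValueError(
--             "Coluna(s) invalida(s) em --structured-columns: "
--             f"{', '.join(invalid)}. "
--             "Colunas permitidas: "
--             f"{', '.join(STRUCTURED_COLUMNS)}"
--         )
--
--     # remove duplicidade mantendo ordem de entrada
--     unique_columns = list(dict.fromkeys(cleaned))
--     return unique_columns
-- ===== SOURCE B (Python) =====
-- from typing import List, Optional
--
-- STRUCTURED_COLUMNS = [
--     "cabecalho",
--     "periodo_inicio",
--     "periodo_fim",
--     "cnpj",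
--     "conta_codigo",
--     "conta_nome",
--     "data_lancamento",
--     "historico",
--     "valor",
--     "total_debito",
--     "arquivo",
--     "source",
--     "pagina",
-- ]
--
-- def validate_structured_columns(selected_columns: Optional[List[str]]) -> List[str]:
--     if selected_columns is None:
--         return STRUCTURED_COLUMNS
--     result: List[str] = []
--     seen = set()
--     invalid: List[str] = []
--     for col in selected_columns:
--         if not col:
--             continue
--         c = col.strip()
--         if not c:
--             continue
--         if c not in STRUCTURED_COLUMNS:
--             invalid.append(c)
--         elif c not in seen:
--             seen.add(c)
--             result.append(c)
--     if not result and not invalid: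
--         raise ValueError(
--             "Nenhuma coluna valida foi informada em --structured-columns."
--         )
--     if invalid:
--         raise ValueError(
--             "Coluna(s) invalida(s) em --structured-columns: "
--             f"{', '.join(invalid)}. "
--             "Colunas permitidas: "
--             f"{', '.join(STRUCTURED_COLUMNS)}"
--         )
--     return result
-- ===== Notes on version B (the rewrite author's own statement) =====
-- stated objective: alternative
-- what changed: A's three sequential list passes (clean, find invalids, dict.fromkeys dedup) are fused into one loop over selected_columns maintaining a result list, a seen set and an invalid list; the same two ValueErrors are raised after the loop in A's order.
import Mathlib
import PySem

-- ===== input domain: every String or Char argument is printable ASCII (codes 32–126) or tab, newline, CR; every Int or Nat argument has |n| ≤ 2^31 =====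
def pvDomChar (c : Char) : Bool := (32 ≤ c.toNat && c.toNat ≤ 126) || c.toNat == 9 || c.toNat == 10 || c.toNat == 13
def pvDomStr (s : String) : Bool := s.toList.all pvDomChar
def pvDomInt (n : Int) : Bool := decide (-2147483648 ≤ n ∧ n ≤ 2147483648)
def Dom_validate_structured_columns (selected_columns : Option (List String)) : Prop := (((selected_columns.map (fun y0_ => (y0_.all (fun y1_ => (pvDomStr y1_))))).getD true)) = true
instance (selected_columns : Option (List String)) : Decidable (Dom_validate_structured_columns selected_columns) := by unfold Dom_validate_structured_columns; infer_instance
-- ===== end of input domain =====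

-- B fuses A's three sequential passes (clean, collect invalids, dedup) into one loop with a seen set; equivalence on inputs where A returns (Pre_ excludes both ValueError cases).

def STRUCTURED_COLUMNS : List String :=
  ["cabecalho", "periodo_inicio", "periodo_fim", "cnpj", "conta_codigo", "conta_nome",
   "data_lancamento", "historico", "valor", "total_debito", "arquivo", "source", "pagina"]

-- ===== PORT A =====
def validate_structured_columns (selected_columns : Option (List String)) : List String :=
  match selected_columns with
  | none => STRUCTURED_COLUMNS
  | some cols =>
    -- cleaned = [col.strip() for col in selected_columns if col and col.strip()]
    let cleaned := (cols.filter (fun col => col != "" && PySem.Str.strip col != "")).map (fun col => PySem.Str.strip col)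
    if cleaned = [] then []   -- raise ValueError("Nenhuma coluna valida ...")  (excluded by Pre_)
    else
      let invalid := cleaned.filter (fun col => !(STRUCTURED_COLUMNS.contains col))
      if invalid ≠ [] then [] -- raise ValueError("Coluna(s) invalida(s) ...")  (excluded by Pre_)
      else PySem.List.dedup cleaned   -- list(dict.fromkeys(cleaned))

-- ===== PORT B =====
-- one pass over the columns maintaining (result, seen, invalid)
def vscLoop : List String → List String × PySem.Set String × List String → List String × PySem.Set String × List String
  | [], st => st
  | col :: rest, (res, seen, inv) =>
    if col = "" then vscLoop rest (res, seen, inv)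
    else
      let c := PySem.Str.strip col
      if c = "" then vscLoop rest (res, seen, inv)
      else if !(STRUCTURED_COLUMNS.contains c) then vscLoop rest (res, seen, inv ++ [c])
      else if PySem.Set.contains seen c then vscLoop rest (res, seen, inv)
      else vscLoop rest (res ++ [c], PySem.Set.add seen c, inv)

def validate_structured_columns_alt (selected_columns : Option (List String)) : List String :=
  match selected_columns with
  | none => STRUCTURED_COLUMNS
  | some cols =>
    let st := vscLoop cols ([], PySem.Set.empty, [])
    if st.1 = [] ∧ st.2.2 = [] then []  -- raise ValueError("Nenhuma coluna valida ...")
    else if st.2.2 ≠ [] then []         -- raise ValueError("Coluna(s) invalida(s) ...")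
    else st.1

-- ===== PRECONDITION & SPEC =====
-- Pre_ excludes exactly the inputs on which A raises ValueError (B raises the same errors there):
-- a non-None list whose entries are all empty/whitespace, or one containing a stripped name outside STRUCTURED_COLUMNS.
def Pre_validate_structured_columns (selected_columns : Option (List String)) : Prop :=
  (match selected_columns with
   | none => true
   | some cols =>
     cols.any (fun col => col != "" && PySem.Str.strip col != "") &&
     cols.all (fun col => col == "" || PySem.Str.strip col == "" || STRUCTURED_COLUMNS.contains (PySem.Str.strip col))) = true
instance (selected_columns : Option (List String)) : Decidable (Pre_validate_structured_columns selected_columns) := by unfold Pre_validate_structured_columns; infer_instance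

def pvWitness_validate_structured_columns : Option (List String) := some ["cnpj", " valor ", "", "cnpj"]

def Spec_validate_structured_columns (selected_columns : Option (List String)) (out : List String) : Prop := out = validate_structured_columns_alt selected_columns
instance (selected_columns : Option (List String)) (out : List String) : Decidable (Spec_validate_structured_columns selected_columns out) := by unfold Spec_validate_structured_columns; infer_instance

-- ===== CLAIM (what is proved, stated in full; the proofs are below) =====
def Claim_equal_validate_structured_columns : Prop := ∀ (selected_columns : Option (List String)), Dom_validate_structured_columns selected_columns → Pre_validate_structured_columns selected_columns → Spec_validate_structured_columns selected_columns (validate_structured_columns selected_columns)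

-- ===== LEMMAS AND PROOFS =====

-- the cleaned list A builds from cols
def vscCleaned (cols : List String) : List String :=
  (cols.filter (fun col => col != "" && PySem.Str.strip col != "")).map (fun col => PySem.Str.strip col)

-- Loop invariant: when every surviving stripped name is allowed, the invalid list never grows,
-- seen stays equal (as a list) to result, and result accumulates Set.add over the cleaned names.
lemma vscLoop_inv (cols : List String) (res inv : List String)
    (h : ∀ col ∈ cols, col ≠ "" → PySem.Str.strip col ≠ "" → STRUCTURED_COLUMNS.contains (PySem.Str.strip col) = true) :
    vscLoop cols (res, res, inv) = ((vscCleaned cols).foldl PySem.Set.add res, (vscCleaned cols).foldl PySem.Set.add res, inv) := by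
  induction cols generalizing res with
  | nil => simp [vscLoop, vscCleaned]
  | cons col rest ih =>
    have hrest : ∀ c ∈ rest, c ≠ "" → PySem.Str.strip c ≠ "" → STRUCTURED_COLUMNS.contains (PySem.Str.strip c) = true :=
      fun c hc => h c (List.mem_cons_of_mem _ hc)
    by_cases hcol : col = ""
    · simp [vscLoop, hcol, vscCleaned] at *
      exact ih res hrest
    · by_cases hstrip : PySem.Str.strip col = ""
      · simp [vscLoop, hcol, hstrip, vscCleaned] at *
        exact ih res hrest
      · have hall : STRUCTURED_COLUMNS.contains (PySem.Str.strip col) = true :=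
          h col (List.mem_cons_self) hcol hstrip
        have hclean : vscCleaned (col :: rest) = PySem.Str.strip col :: vscCleaned rest := by
          simp [vscCleaned, hcol, hstrip]
        have hallm : PySem.Str.strip col ∈ STRUCTURED_COLUMNS := by simpa using hall
        by_cases hseen : PySem.Str.strip col ∈ res
        · simp [vscLoop, hcol, hstrip, hclean, hallm, hseen, PySem.Set.contains,
            PySem.Set.add, List.contains_eq_mem]
          exact ih res hrest
        · simp [vscLoop, hcol, hstrip, hclean, hallm, hseen, PySem.Set.contains,
            PySem.Set.add, List.contains_eq_mem]
          exact ih _ hrest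

theorem validate_structured_columns_spec : Claim_equal_validate_structured_columns := by
  intro sc _ hpre
  unfold Spec_validate_structured_columns
  cases sc with
  | none => rfl
  | some cols =>
    unfold Pre_validate_structured_columns at hpre
    rw [Bool.and_eq_true, List.any_eq_true, List.all_eq_true] at hpre
    obtain ⟨⟨w, hw, hwne⟩, hall⟩ := hpre
    have hall' : ∀ col ∈ cols, col ≠ "" → PySem.Str.strip col ≠ "" → STRUCTURED_COLUMNS.contains (PySem.Str.strip col) = true := by
      intro c hc hne hsne
      have h3 := hall c hc
      rw [Bool.or_eq_true, Bool.or_eq_true] at h3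
      rcases h3 with (h1 | h1) | h1
      · exact absurd (by simpa using h1) hne
      · exact absurd (by simpa using h1) hsne
      · exact h1
    have hloop := vscLoop_inv cols [] [] hall'
    -- cleaned is nonempty (witness w) and contains only allowed names
    simp only [Bool.and_eq_true, bne_iff_ne, ne_eq] at hwne
    have hwclean : PySem.Str.strip w ∈ vscCleaned cols := by
      simp [vscCleaned, List.mem_map, List.mem_filter]
      exact ⟨w, ⟨hw, by simp [hwne.1, hwne.2]⟩, rfl⟩
    have hne : vscCleaned cols ≠ [] := by
      intro h; rw [h] at hwclean; exact absurd hwclean (List.not_mem_nil)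
    have hresmem : PySem.Str.strip w ∈ (vscCleaned cols).foldl PySem.Set.add [] := by
      have : (vscCleaned cols).foldl PySem.Set.add [] = PySem.Set.ofList (vscCleaned cols) := by
        rw [PySem.Set.ofList_eq_foldl]
      rw [this]
      rw [PySem.Set.mem_ofList]
      exact hwclean
    have hresne : (vscCleaned cols).foldl PySem.Set.add [] ≠ [] := by
      intro h; rw [h] at hresmem; exact absurd hresmem (List.not_mem_nil)
    have hinv : (vscCleaned cols).filter (fun col => !(STRUCTURED_COLUMNS.contains col)) = [] := by
      rw [List.filter_eq_nil_iff]
      intro c hc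
      simp [vscCleaned, List.mem_map, List.mem_filter] at hc
      obtain ⟨x, ⟨hx, hx1, hx2⟩, rfl⟩ := hc
      simpa using hall' x hx hx1 hx2
    -- A's side reduces to dedup of the cleaned list, B's to the fold the invariant gives
    have hA : validate_structured_columns (some cols) = PySem.List.dedup (vscCleaned cols) := by
      show (if vscCleaned cols = [] then []
            else if (vscCleaned cols).filter (fun col => !(STRUCTURED_COLUMNS.contains col)) ≠ [] then []
            else PySem.List.dedup (vscCleaned cols)) = _
      rw [if_neg hne, if_neg (by rw [ne_eq, not_not]; exact hinv)]
    have hB : validate_structured_columns_alt (some cols) = (vscCleaned cols).foldl PySem.Set.add [] := by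
      show (if (vscLoop cols ([], PySem.Set.empty, [])).1 = [] ∧ (vscLoop cols ([], PySem.Set.empty, [])).2.2 = [] then []
            else if (vscLoop cols ([], PySem.Set.empty, [])).2.2 ≠ [] then []
            else (vscLoop cols ([], PySem.Set.empty, [])).1) = _
      rw [show vscLoop cols ([], PySem.Set.empty, []) = ((vscCleaned cols).foldl PySem.Set.add [], (vscCleaned cols).foldl PySem.Set.add [], []) from hloop]
      simp [hresne]
    rw [hA, hB, PySem.List.dedup_eq_ofList, PySem.Set.ofList_eq_foldl]
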